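-- pv_equiv track=rewrite | github.com/yashbrown21/AdventOfCode | 2025/Day10/day10.py | check_tuple_list
-- ===== SOURCE A (Python) =====
-- from collections import Counter
--
-- def check_tuple_list(target, button_combi):
--     button_moves = [i for sub in button_combi for i in sub]
--     button_counts = Counter(button_moves)
--     actual_lights_on = tuple(sorted(set([i for i in button_moves if button_counts[i] % 2 != 0])))
--
--     if actual_lights_on == target:
--         return True
--     else:
--         return False
-- ===== SOURCE B (Python) =====
-- def check_tuple_list(target, button_combi):
--     # One toggling pass: after it, `parity` holds exactly the elements
--     # pressed an odd number of times.
--     parity = set()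
--     for sub in button_combi:
--         for i in sub:
--             if i in parity:
--                 parity.discard(i)
--             else:
--                 parity.add(i)
--     return tuple(sorted(parity)) == target
-- ===== Notes on version B (the rewrite author's own statement) =====
-- stated objective: simpler
-- what changed: Replaces flatten + Counter + odd-filter + set + sort with a single toggling pass that maintains the parity set directly, then sorts it once.
import Mathlib
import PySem

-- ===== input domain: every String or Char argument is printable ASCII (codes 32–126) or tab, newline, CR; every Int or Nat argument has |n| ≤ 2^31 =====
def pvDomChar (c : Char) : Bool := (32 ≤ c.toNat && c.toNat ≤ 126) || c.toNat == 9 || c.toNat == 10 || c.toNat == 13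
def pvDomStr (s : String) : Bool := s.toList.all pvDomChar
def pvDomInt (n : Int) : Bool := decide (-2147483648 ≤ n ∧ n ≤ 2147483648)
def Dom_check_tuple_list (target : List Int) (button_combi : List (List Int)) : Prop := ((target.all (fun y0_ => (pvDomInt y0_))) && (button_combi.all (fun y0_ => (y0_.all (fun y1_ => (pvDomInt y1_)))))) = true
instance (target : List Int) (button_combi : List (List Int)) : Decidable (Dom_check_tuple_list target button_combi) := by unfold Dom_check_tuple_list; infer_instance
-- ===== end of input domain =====

-- B replaces flatten + Counter + odd-filter + set + sort with one toggling pass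
-- that maintains the parity set directly (objective: simpler).

-- ===== PORT A =====
def check_tuple_list (target : List Int) (button_combi : List (List Int)) : Bool :=
  let button_moves := button_combi.foldl (fun acc sub => acc ++ sub) ([] : List Int)
  let button_counts := PySem.Dict.counter button_moves
  let actual_lights_on :=
    PySem.List.sorted
      (PySem.Set.ofList
        (button_moves.filter (fun i => PySem.Int.mod (button_counts.getD i 0) 2 ≠ 0)))
      (fun x => x) false
  if actual_lights_on = target then true else false

-- ===== PORT B =====
def check_tuple_list_alt (target : List Int) (button_combi : List (List Int)) : Bool :=
  let parity :=
    button_combi.foldl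
      (fun p sub =>
        sub.foldl
          (fun p i =>
            if PySem.Set.contains p i then PySem.Set.discard p i else PySem.Set.add p i)
          p)
      (PySem.Set.empty : PySem.Set Int)
  decide (PySem.List.sorted parity (fun x => x) false = target)

-- ===== PRECONDITION & SPEC =====
def Spec_check_tuple_list (target : List Int) (button_combi : List (List Int)) (out : Bool) : Prop := out = check_tuple_list_alt target button_combi
instance (target : List Int) (button_combi : List (List Int)) (out : Bool) : Decidable (Spec_check_tuple_list target button_combi out) := by unfold Spec_check_tuple_list; infer_instance

-- ===== CLAIM (what is proved, stated in full; the proofs are below) =====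
def Claim_equal_check_tuple_list : Prop := ∀ (target : List Int) (button_combi : List (List Int)), Dom_check_tuple_list target button_combi → Spec_check_tuple_list target button_combi (check_tuple_list target button_combi)

-- ===== LEMMAS AND PROOFS =====

-- the toggle step of B
def pvTog (p : PySem.Set Int) (i : Int) : PySem.Set Int :=
  if PySem.Set.contains p i then PySem.Set.discard p i else PySem.Set.add p i

lemma pvTog_nodup (p : PySem.Set Int) (i : Int) (h : p.Nodup) : (pvTog p i).Nodup := by
  unfold pvTog
  split
  · exact PySem.Set.nodup_discard p i h
  · exact PySem.Set.nodup_add p i h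

lemma pvTog_mem (p : PySem.Set Int) (i x : Int) :
    x ∈ pvTog p i ↔ ((x ∈ p) ↔ ¬ x = i) := by
  unfold pvTog
  by_cases hip : i ∈ p
  · rw [if_pos ((PySem.Set.contains_iff p i).mpr hip), PySem.Set.mem_discard]
    by_cases hxi : x = i <;> simp [hxi, hip]
  · rw [if_neg (fun hc => hip ((PySem.Set.contains_iff p i).mp hc)), PySem.Set.mem_add]
    by_cases hxi : x = i <;> simp [hxi, hip]

-- invariant of B's toggling loop over a flat move list
lemma pvFoldTog (l : List Int) : ∀ (p : PySem.Set Int), p.Nodup →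
    (l.foldl pvTog p).Nodup ∧
      ∀ x, x ∈ l.foldl pvTog p ↔ ((x ∈ p) ↔ l.count x % 2 = 0) := by
  induction l with
  | nil => intro p hp; exact ⟨hp, by simp⟩
  | cons i l ih =>
    intro p hp
    obtain ⟨hn, hm⟩ := ih (pvTog p i) (pvTog_nodup p i hp)
    refine ⟨hn, fun x => ?_⟩
    rw [List.foldl_cons, hm x, pvTog_mem p i x]
    by_cases hxi : x = i
    · subst hxi
      have hcnt : (x :: l).count x = l.count x + 1 := by simp
      rw [hcnt]
      have hpar : (l.count x + 1) % 2 = 0 ↔ ¬ (l.count x % 2 = 0) := by omega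
      rw [hpar]; tauto
    · have hne : ¬ i = x := fun h => hxi h.symm
      have hcnt : (i :: l).count x = l.count x := by simp [hne]
      rw [hcnt]; simp [hxi]

-- B's nested foldl equals the toggling fold over A's flattened move list
lemma pvNested_eq_flat (bc : List (List Int)) :
    ∀ (a : List Int) (p : PySem.Set Int),
      bc.foldl (fun p sub => sub.foldl pvTog p) (a.foldl pvTog p)
        = (bc.foldl (fun acc sub => acc ++ sub) a).foldl pvTog p := by
  induction bc with
  | nil => intro a p; simp
  | cons s bc ih =>
    intro a p
    simp only [List.foldl_cons]
    rw [← List.foldl_append, ih]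

-- membership in A's odd-count set
lemma pvA_mem (flat : List Int) (x : Int) :
    x ∈ PySem.Set.ofList
        (flat.filter (fun i => PySem.Int.mod ((PySem.Dict.counter flat).getD i 0) 2 ≠ 0))
      ↔ ¬ flat.count x % 2 = 0 := by
  rw [PySem.Set.mem_ofList, List.mem_filter]
  simp only [PySem.Dict.getD_counter, decide_eq_true_eq, ne_eq, PySem.Int.mod_eq_zero_iff_dvd]
  have h2 : (2 : Int) ∣ (flat.count x : Int) ↔ flat.count x % 2 = 0 := by
    constructor
    · intro h
      have : (2 : Nat) ∣ flat.count x := by exact_mod_cast h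
      omega
    · intro h
      have : (2 : Nat) ∣ flat.count x := by omega
      exact_mod_cast this
  rw [h2]
  constructor
  · rintro ⟨-, h⟩; exact h
  · intro h; exact ⟨List.count_pos_iff.mp (by omega), h⟩

-- ===== VERDICT (by name: the statement is the Claim_ definition above) =====
theorem check_tuple_list_spec : Claim_equal_check_tuple_list := by
  intro target bc _
  unfold Spec_check_tuple_list check_tuple_list check_tuple_list_alt
  simp only []
  set flat := bc.foldl (fun acc sub => acc ++ sub) ([] : List Int) with hflat
  have hB : bc.foldl (fun p sub => sub.foldl pvTog p) (PySem.Set.empty : PySem.Set Int)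
      = flat.foldl pvTog PySem.Set.empty := by
    have := pvNested_eq_flat bc [] PySem.Set.empty
    simpa using this
  obtain ⟨hnodB, hmemB⟩ := pvFoldTog flat PySem.Set.empty List.nodup_nil
  have hperm :
      (PySem.Set.ofList
        (flat.filter (fun i => PySem.Int.mod ((PySem.Dict.counter flat).getD i 0) 2 ≠ 0))).Perm
        (flat.foldl pvTog PySem.Set.empty) := by
    rw [List.perm_ext_iff_of_nodup (PySem.Set.nodup_ofList _) hnodB]
    intro x
    rw [pvA_mem, hmemB x]
    simp [PySem.Set.empty]
  have hsorted :
      PySem.List.sorted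
          (PySem.Set.ofList
            (flat.filter (fun i => PySem.Int.mod ((PySem.Dict.counter flat).getD i 0) 2 ≠ 0)))
          (fun x => x) false
        = PySem.List.sorted (flat.foldl pvTog PySem.Set.empty) (fun x => x) false :=
    PySem.List.sorted_eq_sorted_of_perm _ _ _ (fun a b h => h) hperm
  show (if _ = target then true else false) = _
  rw [show (fun (p : PySem.Set Int) (i : Int) =>
        if PySem.Set.contains p i then PySem.Set.discard p i else PySem.Set.add p i) = pvTog from rfl]
  rw [hB, ← hsorted]
  split <;> simp_all
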